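-- pv_equiv track=rewrite | github.com/Jumbo125/Autodarts-Webinterface-Installation | Webpanel/autodarts-web.py | _best_resolution_for_formats
-- ===== SOURCE A (Python) =====
-- def _best_resolution_for_formats(resolutions: dict[str, list[tuple[int,int]]], preferred_formats: list[str]) -> tuple[str|None, str|None]:
--     """Pick best (format, WxH) based on preferences and available discrete sizes."""
--     # Prefer common sizes if present, otherwise max area.
--     preferred_sizes = [(1920,1080),(1600,1200),(1280,720),(1024,768),(800,600),(640,480)]
--     for fmt in preferred_formats:
--         sizes = resolutions.get(fmt) or []
--         if not sizes:
--             continue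
--         for wh in preferred_sizes:
--             if wh in sizes:
--                 return fmt, f"{wh[0]}x{wh[1]}"
--         # fallback: largest area
--         w,h = max(sizes, key=lambda x: x[0]*x[1])
--         return fmt, f"{w}x{h}"
--     return None, None
-- ===== SOURCE B (Python) =====
-- def _best_resolution_for_formats(resolutions, preferred_formats):
--     """Pick best (format, WxH) based on preferences and available discrete sizes."""
--     preferred_sizes = [(1920,1080),(1600,1200),(1280,720),(1024,768),(800,600),(640,480)]
--     rank = {wh: i for i, wh in enumerate(preferred_sizes)}
--     # first preferred format that has any sizes at all
--     fmt = next((f for f in preferred_formats if resolutions.get(f)), None)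
--     if fmt is None:
--         return None, None
--     # one pass: most preferred size if any is ranked, else largest area (lex key)
--     w, h = min(resolutions[fmt], key=lambda wh: (rank.get(wh, len(rank)), -wh[0]*wh[1]))
--     return fmt, f"{w}x{h}"
-- ===== Notes on version B (the rewrite author's own statement) =====
-- stated objective: alternative
-- what changed: B replaces A's two-stage inner logic (walk the preference list testing membership, else a separate max-area scan) by a single min pass over the available sizes with the lexicographic key (preference rank from a dict, -area), and picks the format with one next/find over preferred_formats.
import Mathlib
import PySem

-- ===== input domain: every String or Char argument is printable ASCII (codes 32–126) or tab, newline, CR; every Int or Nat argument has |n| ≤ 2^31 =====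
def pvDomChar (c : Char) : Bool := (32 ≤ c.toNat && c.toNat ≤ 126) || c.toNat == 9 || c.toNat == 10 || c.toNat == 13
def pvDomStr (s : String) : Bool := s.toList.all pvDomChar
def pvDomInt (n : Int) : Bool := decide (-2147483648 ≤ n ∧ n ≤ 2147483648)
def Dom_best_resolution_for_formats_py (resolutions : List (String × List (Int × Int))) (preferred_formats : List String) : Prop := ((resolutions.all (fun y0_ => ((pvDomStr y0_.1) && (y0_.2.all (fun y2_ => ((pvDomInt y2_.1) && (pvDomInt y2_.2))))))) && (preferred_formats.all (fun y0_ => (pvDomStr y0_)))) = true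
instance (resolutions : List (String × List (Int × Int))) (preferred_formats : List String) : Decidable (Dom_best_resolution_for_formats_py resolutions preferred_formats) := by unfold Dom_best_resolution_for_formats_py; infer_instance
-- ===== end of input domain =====

-- B replaces A's two-stage inner logic (scan the preference list testing membership,
-- else a separate max-area pass) by ONE pass over the available sizes minimizing the
-- lexicographic key (preference rank, -area), and finds the format with a single find
-- over preferred_formats; equal return value proved on the whole domain (objective:
-- alternative, not timed faster).

-- ===== PORT A =====
-- shared literal: the preferred_sizes constant of both Pythons
def pvPreferredSizes : List (Int × Int) :=
  [(1920,1080),(1600,1200),(1280,720),(1024,768),(800,600),(640,480)]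

-- shared literal: f"{w}x{h}"
def pvFmtStr (w h : Int) : String := PySem.Int.toStr w ++ "x" ++ PySem.Int.toStr h

-- the `for fmt in preferred_formats` loop of A
def pvAloop (resolutions : List (String × List (Int × Int))) : List String → Option String × Option String
  | [] => (none, none)
  | fmt :: rest =>
    -- sizes = resolutions.get(fmt) or []
    let sizes := (PySem.Dict.get? (PySem.Dict.mk resolutions) fmt).getD []
    if sizes.isEmpty then pvAloop resolutions rest
    else
      -- for wh in preferred_sizes: if wh in sizes: return fmt, f"{wh[0]}x{wh[1]}"
      match pvPreferredSizes.find? (fun wh => sizes.contains wh) with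
      | some wh => (some fmt, some (pvFmtStr wh.1 wh.2))
      | none =>
        -- w,h = max(sizes, key=lambda x: x[0]*x[1])
        match PySem.List.max? sizes (fun x => x.1 * x.2) with
        | some wh => (some fmt, some (pvFmtStr wh.1 wh.2))
        | none => (none, none)   -- unreachable: sizes is nonempty here

def best_resolution_for_formats_py (resolutions : List (String × List (Int × Int))) (preferred_formats : List String) : Option String × Option String :=
  pvAloop resolutions preferred_formats

-- ===== PORT B =====
-- rank = {wh: i for i, wh in enumerate(preferred_sizes)}
def pvRank : PySem.Dict (Int × Int) Int :=
  (PySem.List.enumerate pvPreferredSizes).foldl (fun d p => d.insert p.2 p.1) PySem.Dict.empty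

-- lambda wh: (rank.get(wh, len(rank)), -wh[0]*wh[1])  — len(rank) = 6
def pvKey1 (wh : Int × Int) : Int := PySem.Dict.getD pvRank wh 6
def pvKey2 (wh : Int × Int) : Int := -(wh.1 * wh.2)

def best_resolution_for_formats_py_alt (resolutions : List (String × List (Int × Int))) (preferred_formats : List String) : Option String × Option String :=
  -- fmt = next((f for f in preferred_formats if resolutions.get(f)), None)
  match preferred_formats.find? (fun f => !((PySem.Dict.get? (PySem.Dict.mk resolutions) f).getD []).isEmpty) with
  | none => (none, none)
  | some fmt =>
    -- w,h = min(resolutions[fmt], key=lambda wh: (rank.get(wh, len(rank)), -wh[0]*wh[1]))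
    match PySem.List.min2? ((PySem.Dict.get? (PySem.Dict.mk resolutions) fmt).getD []) pvKey1 pvKey2 with
    | some wh => (some fmt, some (pvFmtStr wh.1 wh.2))
    | none => (none, none)   -- unreachable: the found format's sizes list is nonempty

-- ===== PRECONDITION & SPEC =====
def Spec_best_resolution_for_formats_py (resolutions : List (String × List (Int × Int))) (preferred_formats : List String) (out : Option String × Option String) : Prop := out = best_resolution_for_formats_py_alt resolutions preferred_formats
instance (resolutions : List (String × List (Int × Int))) (preferred_formats : List String) (out : Option String × Option String) : Decidable (Spec_best_resolution_for_formats_py resolutions preferred_formats out) := by unfold Spec_best_resolution_for_formats_py; infer_instance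

-- ===== CLAIM =====
def Claim_equal_best_resolution_for_formats_py : Prop := ∀ (resolutions : List (String × List (Int × Int))) (preferred_formats : List String), Dom_best_resolution_for_formats_py resolutions preferred_formats → Spec_best_resolution_for_formats_py resolutions preferred_formats (best_resolution_for_formats_py resolutions preferred_formats)

-- ===== LEMMAS AND PROOFS =====

-- the foldl step of PySem.List.min2? with keys pvKey1, pvKey2
def pvF2 (acc : Option (Int × Int)) (x : Int × Int) : Option (Int × Int) :=
  match acc with
  | none => some x
  | some m =>
    if (decide (pvKey1 x < pvKey1 m) || !decide (pvKey1 m < pvKey1 x) && decide (pvKey2 x < pvKey2 m)) = true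
    then some x else some m

lemma pv_min2_eq_fold (xs : List (Int × Int)) :
    PySem.List.min2? xs pvKey1 pvKey2 = List.foldl pvF2 none xs := by
  unfold PySem.List.min2? pvF2
  congr 1
  funext acc x
  cases acc <;> rfl

-- the foldl step of PySem.List.max? with the area key
def pvFmax (acc : Option (Int × Int)) (x : Int × Int) : Option (Int × Int) :=
  match acc with
  | none => some x
  | some m => if m.1 * m.2 < x.1 * x.2 then some x else some m

lemma pv_max_eq_fold (xs : List (Int × Int)) :
    PySem.List.max? xs (fun x => x.1 * x.2) = List.foldl pvFmax none xs := by
  unfold PySem.List.max? pvFmax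
  congr 1
  funext acc x
  cases acc <;> rfl

-- rank.get(wh, 6) written out as a case split on wh
lemma pv_rank_char (x : Int × Int) : pvKey1 x =
    if (1920,1080) = x then 0 else if (1600,1200) = x then 1 else if (1280,720) = x then 2
    else if (1024,768) = x then 3 else if (800,600) = x then 4 else if (640,480) = x then 5
    else 6 := by
  have h : pvRank = PySem.Dict.mk
      [((1920,1080),(0:Int)), ((1600,1200),1), ((1280,720),2),
       ((1024,768),3), ((800,600),4), ((640,480),5)] := by decide
  simp only [pvKey1, h, PySem.Dict.getD, PySem.Dict.get?_mk_cons, beq_iff_eq,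
    apply_ite (fun o : Option Int => o.getD 6), Option.getD_some]
  split_ifs <;> rfl

-- the rank of the t-th preferred size is t
lemma pv_rank_at : ∀ t (_ : t < pvPreferredSizes.length),
    pvKey1 pvPreferredSizes[t] = (t : Int) := by decide

-- a size outside the preference list gets the default rank 6
lemma pv_rank_not_mem (x : Int × Int) (hx : x ∉ pvPreferredSizes) : pvKey1 x = 6 := by
  simp only [pvPreferredSizes, List.mem_cons, List.not_mem_nil, or_false, not_or] at hx
  obtain ⟨n1, n2, n3, n4, n5, n6⟩ := hx
  rw [pv_rank_char, if_neg (fun h => n1 h.symm), if_neg (fun h => n2 h.symm),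
    if_neg (fun h => n3 h.symm), if_neg (fun h => n4 h.symm),
    if_neg (fun h => n5 h.symm), if_neg (fun h => n6 h.symm)]

-- foldl invariant, "first preferred" case: once p (the strictly best-ranked value) is
-- seen, the accumulator is some p and stays; before that the accumulator's rank is > i
lemma pv_fold_pick (i : Int) (p : Int × Int) (hp : pvKey1 p = i) :
    ∀ (l : List (Int × Int)) (acc : Option (Int × Int)),
      (∀ y ∈ l, i < pvKey1 y ∨ y = p) →
      (acc = some p ∨ (p ∈ l ∧ (acc = none ∨ ∃ m, acc = some m ∧ i < pvKey1 m))) →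
      List.foldl pvF2 acc l = some p := by
  intro l
  induction l with
  | nil =>
    intro acc _ hacc
    rcases hacc with h | ⟨hmem, _⟩
    · simpa using h
    · simp at hmem
  | cons x t ih =>
    intro acc hall hacc
    have hallt : ∀ y ∈ t, i < pvKey1 y ∨ y = p := fun y hy => hall y (List.mem_cons_of_mem _ hy)
    have hx := hall x List.mem_cons_self
    rw [List.foldl_cons]
    rcases hacc with h | ⟨hmem, hrest⟩
    · subst h
      rcases hx with hlt | heq
      · have hcond : (decide (pvKey1 x < pvKey1 p) || !decide (pvKey1 p < pvKey1 x) && decide (pvKey2 x < pvKey2 p)) = false := by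
          rw [hp]; simp only [Bool.or_eq_false_iff, Bool.and_eq_false_iff]
          constructor
          · simp; omega
          · left; simp; omega
        apply ih _ hallt
        left
        simp [pvF2, hcond]
      · subst heq
        apply ih _ hallt
        left
        simp only [pvF2]
        split <;> rfl
    · rcases hrest with hnone | ⟨m, hm, hmi⟩
      · subst hnone
        simp only [pvF2]
        by_cases hxp : x = p
        · exact ih _ hallt (Or.inl (by rw [hxp]))
        · have hmemt : p ∈ t := by
            rcases List.mem_cons.mp hmem with h | h
            · exact absurd h.symm hxp
            · exact h
          rcases hx with hlt | heq
          · exact ih _ hallt (Or.inr ⟨hmemt, Or.inr ⟨x, rfl, hlt⟩⟩)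
          · exact absurd heq hxp
      · subst hm
        by_cases hxp : x = p
        · subst hxp
          have hcond : (decide (pvKey1 x < pvKey1 m) || !decide (pvKey1 m < pvKey1 x) && decide (pvKey2 x < pvKey2 m)) = true := by
            simp only [Bool.or_eq_true]; left; simp; omega
          apply ih _ hallt
          left
          simp [pvF2, hcond]
        · have hmemt : p ∈ t := by
            rcases List.mem_cons.mp hmem with h | h
            · exact absurd h.symm hxp
            · exact h
          rcases hx with hlt | heq
          · apply ih _ hallt
            refine Or.inr ⟨hmemt, Or.inr ?_⟩
            simp only [pvF2]
            split
            · exact ⟨x, rfl, hlt⟩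
            · exact ⟨m, rfl, hmi⟩
          · exact absurd heq hxp

-- foldl invariant, "no preferred size available" case: all ranks are 6, so the min2?
-- step is exactly the first-max-by-area step
lemma pv_fold_max :
    ∀ (l : List (Int × Int)) (acc : Option (Int × Int)),
      (∀ y ∈ l, pvKey1 y = 6) → (∀ m, acc = some m → pvKey1 m = 6) →
      List.foldl pvF2 acc l = List.foldl pvFmax acc l := by
  intro l
  induction l with
  | nil => intro acc _ _; rfl
  | cons x t ih =>
    intro acc hall hacc
    have hx : pvKey1 x = 6 := hall x List.mem_cons_self
    have hallt : ∀ y ∈ t, pvKey1 y = 6 := fun y hy => hall y (List.mem_cons_of_mem _ hy)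
    rw [List.foldl_cons, List.foldl_cons]
    cases acc with
    | none =>
      show List.foldl pvF2 (some x) t = List.foldl pvFmax (some x) t
      exact ih _ hallt (fun m hm => by injection hm with h'; subst h'; exact hx)
    | some m =>
      have hm : pvKey1 m = 6 := hacc m rfl
      have hstep : pvF2 (some m) x = if m.1 * m.2 < x.1 * x.2 then some x else some m := by
        simp only [pvF2, hx, hm, pvKey2]
        have h1 : (decide ((6:Int) < 6)) = false := by simp
        rw [h1]
        simp only [Bool.false_or, Bool.not_false, Bool.true_and, decide_eq_true_eq]
        by_cases h : m.1 * m.2 < x.1 * x.2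
        · rw [if_pos (by omega), if_pos h]
        · rw [if_neg (by omega), if_neg h]
      show List.foldl pvF2 (pvF2 (some m) x) t = List.foldl pvFmax (pvFmax (some m) x) t
      rw [hstep]
      have hstep' : pvFmax (some m) x = if m.1 * m.2 < x.1 * x.2 then some x else some m := rfl
      rw [hstep']
      by_cases h : m.1 * m.2 < x.1 * x.2
      · rw [if_pos h]
        exact ih _ hallt (fun m' hm' => by injection hm' with h'; subst h'; exact hx)
      · rw [if_neg h]
        exact ih _ hallt (fun m' hm' => by injection hm' with h'; subst h'; exact hm)

-- the single lex-key pass equals A's two-stage choice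
lemma pv_inner (sizes : List (Int × Int)) :
    PySem.List.min2? sizes pvKey1 pvKey2 =
      (match pvPreferredSizes.find? (fun wh => sizes.contains wh) with
       | some p => some p
       | none => PySem.List.max? sizes (fun x => x.1 * x.2)) := by
  cases hfind : pvPreferredSizes.find? (fun wh => sizes.contains wh) with
  | none =>
    have hall : ∀ y ∈ sizes, pvKey1 y = 6 := by
      intro y hy
      apply pv_rank_not_mem
      intro hmem
      have h2 := List.find?_eq_none.mp hfind y hmem
      simp at h2
      exact h2 hy
    rw [pv_min2_eq_fold, pv_fold_max sizes none hall (by intro m h; cases h), ← pv_max_eq_fold]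
  | some p =>
    obtain ⟨hp, i, hi, hPi, hbef⟩ := List.find?_eq_some_iff_getElem.mp hfind
    have hpmem : p ∈ sizes := by simpa using hp
    have hlen : pvPreferredSizes.length = 6 := by decide
    have hkp : pvKey1 p = (i : Int) := by rw [← hPi]; exact pv_rank_at i hi
    have hall : ∀ y ∈ sizes, (i : Int) < pvKey1 y ∨ y = p := by
      intro y hy
      by_cases hmem : y ∈ pvPreferredSizes
      · obtain ⟨j, hj, hyj⟩ := List.getElem_of_mem hmem
        have hky : pvKey1 y = (j : Int) := by rw [← hyj]; exact pv_rank_at j hj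
        rcases Nat.lt_trichotomy j i with hlt | heq | hgt
        · exfalso
          have := hbef j hlt
          rw [hyj] at this
          simp at this
          exact this hy
        · subst heq
          right
          rw [← hPi, ← hyj]
        · left; rw [hky]; exact_mod_cast hgt
      · left
        rw [pv_rank_not_mem y hmem, hkp] at *
        have : i < 6 := by omega
        rw [hkp]; exact_mod_cast this
    rw [pv_min2_eq_fold]
    exact pv_fold_pick (i : Int) p hkp sizes none hall (Or.inr ⟨hpmem, Or.inl rfl⟩)

-- A's format loop equals B's find-then-pick
lemma pv_loop_eq (resolutions : List (String × List (Int × Int))) :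
    ∀ pf : List String,
      pvAloop resolutions pf = best_resolution_for_formats_py_alt resolutions pf := by
  intro pf
  induction pf with
  | nil => rfl
  | cons fmt rest ih =>
    simp only [pvAloop, best_resolution_for_formats_py_alt, List.find?_cons]
    by_cases hs : ((PySem.Dict.get? (PySem.Dict.mk resolutions) fmt).getD []).isEmpty
    · simp only [hs, Bool.not_true]
      rw [best_resolution_for_formats_py_alt] at ih
      exact ih
    · rw [Bool.not_eq_true] at hs
      simp only [hs, Bool.not_false, Bool.false_eq_true, if_false]
      rw [pv_inner]
      cases pvPreferredSizes.find? (fun wh => ((PySem.Dict.get? (PySem.Dict.mk resolutions) fmt).getD []).contains wh) with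
      | some p => rfl
      | none =>
        cases PySem.List.max? ((PySem.Dict.get? (PySem.Dict.mk resolutions) fmt).getD []) (fun x => x.1 * x.2) with
        | some wh => rfl
        | none => rfl

-- ===== VERDICT =====
theorem best_resolution_for_formats_py_spec : Claim_equal_best_resolution_for_formats_py := by
  intro resolutions preferred_formats _
  show best_resolution_for_formats_py resolutions preferred_formats
      = best_resolution_for_formats_py_alt resolutions preferred_formats
  exact pv_loop_eq resolutions preferred_formats
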